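-- pv_equiv track=rewrite | github.com/fxy1018/Leetcode | find_max_value.py | findMaxValue2
-- ===== SOURCE A (Python) =====
-- def findMaxValue2(arr):
--     if len(arr) <2 :
--             return(0)
--
--     new_arr = []
--     for i in range(len(arr)):
--         new_arr.append(arr[i] + i)
--
--     p1 = 0
--     p2 = 1
--     max_value = -2**31
--     while p2 < len(new_arr):
--         max_value = max(max_value, new_arr[p2]-new_arr[p1])
--         if new_arr[p2] < new_arr[p1]:
--             p1 = p2
--         p2 +=1
--     return(max_value)
-- ===== SOURCE B (Python) =====
-- def findMaxValue2(arr):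
--     n = len(arr)
--     if n < 2:
--         return 0
--     b = [x + i for i, x in enumerate(arr)]
--     smax = b[:]
--     for k in range(n - 2, -1, -1):
--         smax[k] = max(b[k], smax[k + 1])
--     result = -2**31
--     for x, s in zip(b, smax[1:]):
--         result = max(result, s - x)
--     return result
-- ===== Notes on version B (the rewrite author's own statement) =====
-- stated objective: alternative
-- what changed: Replaces the two-pointer running-minimum while loop with a suffix-maximum table filled right-to-left plus a forward scan taking max(smax[i+1]-b[i]); same O(n) cost, different decomposition (best-future-value instead of best-past-value).
import Mathlib
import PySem

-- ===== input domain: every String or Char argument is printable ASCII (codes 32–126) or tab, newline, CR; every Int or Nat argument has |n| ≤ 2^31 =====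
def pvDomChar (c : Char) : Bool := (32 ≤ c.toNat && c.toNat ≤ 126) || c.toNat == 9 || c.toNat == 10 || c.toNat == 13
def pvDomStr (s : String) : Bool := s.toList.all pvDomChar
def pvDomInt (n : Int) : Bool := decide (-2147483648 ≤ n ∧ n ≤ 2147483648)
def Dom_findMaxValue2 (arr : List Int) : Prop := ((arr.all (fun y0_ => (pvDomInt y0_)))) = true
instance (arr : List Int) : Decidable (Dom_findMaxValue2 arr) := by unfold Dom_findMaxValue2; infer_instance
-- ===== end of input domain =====

-- B replaces A's two-pointer running-minimum loop by a suffix-maximum table plus a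
-- forward scan of max(smax[i+1]-b[i]); same O(n) cost, different decomposition ("alternative").

-- ===== PORT A =====
-- literal transliteration of A: build new_arr by appending arr[i]+i over range(len(arr)),
-- then the while loop (p2 = 1,2,…,len-1) as a foldl over that index range with state (p1, max_value).
def findMaxValue2 (arr : List Int) : Int :=
  if arr.length < 2 then 0
  else
    let newArr : List Int :=
      (PySem.List.pyRange 0 arr.length).foldl
        (fun acc i => acc ++ [PySem.List.pyGetD arr i 0 + i]) []
    let st :=
      (PySem.List.pyRange 1 newArr.length).foldl
        (fun (s : Int × Int) p2 =>
          let mv := max s.2 (PySem.List.pyGetD newArr p2 0 - PySem.List.pyGetD newArr s.1 0)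
          let p1 := if PySem.List.pyGetD newArr p2 0 < PySem.List.pyGetD newArr s.1 0 then p2 else s.1
          (p1, mv))
        ((0 : Int), -2 ^ 31)
    st.2

-- ===== PORT B =====
-- B's right-to-left fill of the suffix-maximum table smax (smax[k] = max(b[k], smax[k+1]),
-- smax[n-1] = b[n-1]) rendered as structural recursion on the list; exact.
def smaxOf : List Int → List Int
  | [] => []
  | x :: xs => max x ((smaxOf xs).headD x) :: smaxOf xs

def findMaxValue2_alt (arr : List Int) : Int :=
  if arr.length < 2 then 0
  else
    let b := (PySem.List.enumerate arr).map (fun p => p.2 + p.1)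
    let smax := smaxOf b
    (b.zip smax.tail).foldl (fun r p => max r (p.2 - p.1)) (-2 ^ 31)

-- ===== PRECONDITION & SPEC =====
def Spec_findMaxValue2 (arr : List Int) (out : Int) : Prop := out = findMaxValue2_alt arr
instance (arr : List Int) (out : Int) : Decidable (Spec_findMaxValue2 arr out) := by unfold Spec_findMaxValue2; infer_instance

-- ===== CLAIM (what is proved, stated in full; the proofs are below) =====
def Claim_equal_findMaxValue2 : Prop := ∀ (arr : List Int), Dom_findMaxValue2 arr → Spec_findMaxValue2 arr (findMaxValue2 arr)

-- ===== LEMMAS AND PROOFS =====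

-- canonical left-to-right form of the computation: running minimum mn, accumulator mv
def pvGo (mn mv : Int) : List Int → Int
  | [] => mv
  | x :: xs => pvGo (min mn x) (max mv (x - mn)) xs

-- maximum of y :: ys
def pvMx (y : Int) : List Int → Int
  | [] => y
  | z :: zs => max y (pvMx z zs)

theorem smaxOf_head (y : Int) (ys : List Int) :
    max y ((smaxOf ys).headD y) = pvMx y ys := by
  induction ys generalizing y with
  | nil => simp [smaxOf, pvMx]
  | cons z zs ih =>
    simp only [smaxOf, pvMx, List.headD_cons]
    rw [← ih z]

theorem pvGo_shift (ys : List Int) : ∀ (x y mv : Int),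
    pvGo (min x y) (max mv (y - x)) ys = pvGo y (max mv (pvMx y ys - x)) ys := by
  induction ys with
  | nil => intro x y mv; simp [pvGo, pvMx]
  | cons z zs ih =>
    intro x y mv
    simp only [pvGo, pvMx]
    have h1 : min (min x y) z = min (min x y) z := rfl
    rw [ih (min x y) z (max mv (y - x)), ih y z (max mv (max y (pvMx z zs) - x))]
    congr 1
    omega

theorem zipFold_eq_go (rest : List Int) : ∀ (x mv : Int),
    ((x :: rest).zip (smaxOf rest)).foldl (fun r p => max r (p.2 - p.1)) mv
      = pvGo x mv rest := by
  induction rest with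
  | nil => intro x mv; simp [smaxOf, pvGo]
  | cons y ys ih =>
    intro x mv
    simp only [smaxOf, List.zip_cons_cons, List.foldl_cons]
    rw [smaxOf_head, ih, ← pvGo_shift]
    simp only [pvGo]

-- A's while loop as an index fold equals pvGo on the suffix
theorem foldl_loop_eq_go (L : List Int) (n : Nat) : ∀ (k p1 : Nat) (mv : Int),
    L.length - k = n → p1 < k → k ≤ L.length →
    ((PySem.List.pyRange (k : Int) (L.length : Int)).foldl
        (fun (s : Int × Int) p2 =>
          (if PySem.List.pyGetD L p2 0 < PySem.List.pyGetD L s.1 0 then p2 else s.1,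
            max s.2 (PySem.List.pyGetD L p2 0 - PySem.List.pyGetD L s.1 0)))
        ((p1 : Int), mv)).2
      = pvGo (L.getD p1 0) mv (L.drop k) := by
  induction n with
  | zero =>
    intro k p1 mv hn _ hk
    have hk' : k = L.length := by omega
    subst hk'
    rw [PySem.List.pyRange_one_eq_nil (by omega)]
    simp [pvGo, List.drop_of_length_le (le_refl L.length)]
  | succ m ih =>
    intro k p1 mv hn hp hk
    have hklt : k < L.length := by omega
    rw [PySem.List.pyRange_one_cons (by exact_mod_cast hklt)]
    simp only [List.foldl_cons]
    have hdrop : L.drop k = L[k] :: L.drop (k + 1) := List.drop_eq_getElem_cons hklt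
    have hgk : PySem.List.pyGetD L (k : Int) 0 = L.getD k 0 := PySem.List.pyGetD_natCast L k 0
    have hgp : PySem.List.pyGetD L (p1 : Int) 0 = L.getD p1 0 := PySem.List.pyGetD_natCast L p1 0
    have hcast : ((k : Int) + 1) = ((k + 1 : Nat) : Int) := by push_cast; ring
    have hgetD : L.getD k 0 = L[k] := by
      rw [List.getD_eq_getElem?_getD, List.getElem?_eq_getElem hklt]; rfl
    by_cases hlt : PySem.List.pyGetD L (k : Int) 0 < PySem.List.pyGetD L (p1 : Int) 0
    · simp only [hlt, if_pos]
      rw [hcast, ih (k + 1) k (max mv (PySem.List.pyGetD L (k : Int) 0 - PySem.List.pyGetD L (p1 : Int) 0))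
            (by omega) (by omega) (by omega)]
      rw [hdrop]
      simp only [pvGo]
      rw [hgk, hgp] at hlt ⊢
      congr 1
      · rw [← hgetD]; omega
      · rw [hgetD]
    · simp only [hlt, if_neg, not_false_iff]
      rw [hcast, ih (k + 1) p1 (max mv (PySem.List.pyGetD L (k : Int) 0 - PySem.List.pyGetD L (p1 : Int) 0))
            (by omega) (by omega) (by omega)]
      rw [hdrop]
      simp only [pvGo]
      rw [hgk, hgp] at hlt ⊢
      congr 1
      · rw [← hgetD]; omega
      · rw [hgetD]

-- both programs build the same base list b[i] = arr[i] + i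
theorem base_list_eq (arr : List Int) :
    ((PySem.List.pyRange 0 arr.length).foldl
        (fun acc i => acc ++ [PySem.List.pyGetD arr i 0 + i]) [])
      = (PySem.List.enumerate arr).map (fun p => p.2 + p.1) := by
  rw [PySem.List.foldl_append_singleton_eq_map (fun i => PySem.List.pyGetD arr i 0 + i)]
  rw [PySem.List.enumerate_eq_map_pyRange arr 0, List.map_map]
  simp [PySem.List.len_eq]

theorem base_list_length (arr : List Int) :
    ((PySem.List.enumerate arr).map (fun p => p.2 + p.1)).length = arr.length := by
  rw [PySem.List.enumerate_eq_map_pyRange arr 0, List.map_map, List.length_map]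
  rw [PySem.List.len_eq, PySem.List.pyRange_zero_natCast, List.length_map, List.length_range]

-- ===== VERDICT (by name: the statement is the Claim_ definition above) =====
theorem findMaxValue2_spec : Claim_equal_findMaxValue2 := by
  intro arr _
  unfold Spec_findMaxValue2 findMaxValue2 findMaxValue2_alt
  by_cases hlen : arr.length < 2
  · simp [hlen]
  · rw [if_neg hlen, if_neg hlen]
    rw [base_list_eq]
    set B := (PySem.List.enumerate arr).map (fun p => p.2 + p.1) with hB
    have hBlen : B.length = arr.length := base_list_length arr
    have hB2 : 2 ≤ B.length := by omega
    obtain ⟨h, t, hht⟩ : ∃ h t, B = h :: t :=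
      List.exists_cons_of_ne_nil (by intro h0; rw [h0] at hBlen; simp at hBlen; omega)
    have hloop := foldl_loop_eq_go B (B.length - 1) 1 0 (-2 ^ 31) rfl (by omega) (by omega)
    simp only [Nat.cast_zero, Nat.cast_one] at hloop
    rw [hloop, hht]
    simp only [smaxOf, List.tail_cons]
    rw [zipFold_eq_go]
    simp
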